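-- pv_equiv track=rewrite | github.com/IamDuru/EA | ERAAPI/database/utils.py | convert_to_seconds
-- ===== SOURCE A (Python) =====
-- def convert_to_seconds(duration: str) -> int:
--     parts = list(map(int, duration.split(":")))
--     total = 0
--     multiplier = 1
--
--     for value in reversed(parts):
--         total += value * multiplier
--         multiplier *= 60
--
--     return total
-- ===== SOURCE B (Python) =====
-- def convert_to_seconds(duration: str) -> int:
--     def go(parts):
--         if not parts:
--             return 0
--         return go(parts[:-1]) * 60 + int(parts[-1])
--     return go(duration.split(":"))
-- ===== Notes on version B (the rewrite author's own statement) =====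
-- stated objective: alternative
-- what changed: Replaces A's reversed loop with multiplier/accumulator state by a back-to-front structural recursion over the split pieces (go(parts[:-1])*60 + int(parts[-1])), converting each piece inside the recursion instead of pre-building an int list.
import Mathlib
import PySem

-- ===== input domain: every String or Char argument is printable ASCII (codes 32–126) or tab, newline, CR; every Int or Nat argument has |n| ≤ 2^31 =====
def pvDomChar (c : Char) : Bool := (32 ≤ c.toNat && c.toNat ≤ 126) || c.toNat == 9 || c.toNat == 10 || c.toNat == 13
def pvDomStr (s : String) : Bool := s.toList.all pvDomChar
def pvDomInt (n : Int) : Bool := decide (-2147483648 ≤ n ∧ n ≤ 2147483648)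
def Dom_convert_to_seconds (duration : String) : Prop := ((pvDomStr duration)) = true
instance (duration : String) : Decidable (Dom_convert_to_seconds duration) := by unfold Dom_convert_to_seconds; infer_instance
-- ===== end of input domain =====

-- B replaces A's reversed loop with multiplier state by a back-to-front structural recursion over the split pieces (alternative decomposition, same cost).


-- ===== PORT A =====
-- parts = list(map(int, duration.split(":"))); Pre_ guarantees every int() succeeds, so getD 0 is never taken.
def convert_to_seconds (duration : String) : Int :=
  let parts : List Int := ((PySem.Str.split? duration ":").getD []).map (fun s => (PySem.Int.ofStr? s).getD 0)
  (parts.reverse.foldl (fun (st : Int × Int) value => (st.1 + value * st.2, st.2 * 60)) (0, 1)).1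

-- ===== PORT B =====
-- go(parts): 0 on empty, else go(parts[:-1]) * 60 + int(parts[-1]); Pre_ guarantees int() succeeds, so getD 0 is never taken.
def convert_to_seconds_go : List String → Int
  | [] => 0
  | p :: ps =>
      convert_to_seconds_go (p :: ps).dropLast * 60
        + (PySem.Int.ofStr? ((PySem.List.pyGet? (p :: ps) (-1)).getD "")).getD 0
  termination_by l => l.length
  decreasing_by simp [List.length_dropLast]

def convert_to_seconds_alt (duration : String) : Int :=
  convert_to_seconds_go ((PySem.Str.split? duration ":").getD [])

-- ===== PRECONDITION & SPEC =====
-- Pre_ excludes exactly the inputs where int() raises ValueError on some colon-separated piece.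
def Pre_convert_to_seconds (duration : String) : Prop :=
  ((PySem.Str.split? duration ":").getD []).all (fun s => (PySem.Int.ofStr? s).isSome) = true
instance (duration : String) : Decidable (Pre_convert_to_seconds duration) := by
  unfold Pre_convert_to_seconds; infer_instance
def pvWitness_convert_to_seconds : String := "1:02:03"

def Spec_convert_to_seconds (duration : String) (out : Int) : Prop := out = convert_to_seconds_alt duration
instance (duration : String) (out : Int) : Decidable (Spec_convert_to_seconds duration out) := by unfold Spec_convert_to_seconds; infer_instance

-- ===== CLAIM (what is proved, stated in full; the proofs are below) =====
def Claim_equal_convert_to_seconds : Prop := ∀ (duration : String), Dom_convert_to_seconds duration → Pre_convert_to_seconds duration → Spec_convert_to_seconds duration (convert_to_seconds duration)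

-- ===== LEMMAS AND PROOFS =====
theorem go_append (l : List String) (x : String) :
    convert_to_seconds_go (l ++ [x])
      = convert_to_seconds_go l * 60 + (PySem.Int.ofStr? x).getD 0 := by
  cases l with
  | nil => simp [convert_to_seconds_go, PySem.List.pyGet?, PySem.List.pyIdx?]
  | cons a as =>
    rw [show (a :: as) ++ [x] = a :: (as ++ [x]) from rfl, convert_to_seconds_go]
    have h1 : (a :: (as ++ [x])).dropLast = a :: as := by
      rw [show a :: (as ++ [x]) = (a :: as) ++ [x] from rfl, List.dropLast_concat]
    have h2 : PySem.List.pyGet? (a :: (as ++ [x])) (-1) = some x := by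
      simp [PySem.List.pyGet?, PySem.List.pyIdx?]
    rw [h1, h2]
    simp

theorem loopA_eq (l : List String) (t m : Int) :
    ((l.map (fun s => (PySem.Int.ofStr? s).getD 0)).reverse.foldl
        (fun (st : Int × Int) value => (st.1 + value * st.2, st.2 * 60)) (t, m)).1
      = t + m * convert_to_seconds_go l := by
  induction l using List.reverseRecOn generalizing t m with
  | nil => simp [convert_to_seconds_go]
  | append_singleton l x ih =>
    simp only [List.map_append, List.map_cons, List.map_nil, List.reverse_append,
      List.reverse_cons, List.reverse_nil, List.nil_append, List.singleton_append,
      List.foldl_cons]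
    rw [ih, go_append]
    ring

-- ===== VERDICT (by name: the statement is the Claim_ definition above) =====
theorem convert_to_seconds_spec : Claim_equal_convert_to_seconds := by
  intro duration _ _
  unfold Spec_convert_to_seconds convert_to_seconds convert_to_seconds_alt
  simp only [loopA_eq]
  ring
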